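-- pv_equiv track=rewrite | github.com/doyedele1/algo-series | Questions/OA/Amazon/Find Minimum Health/solution.py | findMinHealth
-- ===== SOURCE A (Python) =====
-- def findMinHealth(power, armor):
--     n = len(power)
--     res = 0
--     arm = True
--     for i in range(n):
--         if power[i] > armor and arm == True:
--             res += power[i] - armor
--             arm = False
--         else:
--             res += power[i]
--     if arm == True:
--         temp = max(power)
--         res -= temp
--         arm = False
--     return res + 1
-- ===== SOURCE B (Python) =====
-- def findMinHealth(power, armor):
--     # divide-and-conquer: merge (sum, max) pairs, then the closed form
--     # result = sum - min(max, armor) + 1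
--     def go(xs):
--         if len(xs) == 1:
--             return xs[0], xs[0]
--         mid = len(xs) // 2
--         s1, m1 = go(xs[:mid])
--         s2, m2 = go(xs[mid:])
--         return s1 + s2, max(m1, m2)
--     s, m = go(power)
--     return s - min(m, armor) + 1
-- ===== Notes on version B (the rewrite author's own statement) =====
-- stated objective: alternative
-- what changed: Replaced the flag-driven linear accumulation loop by a divide-and-conquer recursion merging (sum, max) pairs, finished with the algebraic identity result = sum - min(max, armor) + 1 (no flag, no conditional subtraction).
-- outside the precondition, e.g. on findMinHealth([], 5): A raises ValueError, B raises RecursionError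
import Mathlib
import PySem

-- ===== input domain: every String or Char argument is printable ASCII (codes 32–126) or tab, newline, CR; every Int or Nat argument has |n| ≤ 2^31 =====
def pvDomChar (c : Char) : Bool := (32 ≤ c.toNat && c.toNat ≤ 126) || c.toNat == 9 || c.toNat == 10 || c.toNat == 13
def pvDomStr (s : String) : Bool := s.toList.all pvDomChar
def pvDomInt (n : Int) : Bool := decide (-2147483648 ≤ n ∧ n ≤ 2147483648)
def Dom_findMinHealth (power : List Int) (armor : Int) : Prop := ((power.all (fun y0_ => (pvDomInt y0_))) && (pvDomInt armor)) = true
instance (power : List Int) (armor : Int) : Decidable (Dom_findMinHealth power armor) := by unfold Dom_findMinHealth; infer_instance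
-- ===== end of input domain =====

-- B replaces A's flag-driven loop by a divide-and-conquer (sum,max) recursion plus the identity sum - min(max, armor) + 1; objective: alternative.


-- ===== PORT A =====
-- the flag-driven loop: state (res, arm); after the loop, if arm is still true,
-- subtract max(power) (Python raises ValueError on [], excluded by Pre_; the
-- 'none' branch is unreachable under Pre_).
def findMinHealth (power : List Int) (armor : Int) : Int :=
  let st := power.foldl
    (fun (s : Int × Bool) p =>
      if p > armor ∧ s.2 = true then (s.1 + (p - armor), false) else (s.1 + p, s.2))
    (0, true)
  if st.2 = true then
    match PySem.List.max? power (fun x => x) with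
    | some temp => (st.1 - temp) + 1
    | none => 0
  else st.1 + 1

-- ===== PORT B =====
-- go(xs): divide-and-conquer (sum, max) of a nonempty list; on [] the Python
-- recursion diverges (RecursionError, outside Pre_), here an unreachable (0,0).
def fmhGo (xs : List Int) : Int × Int :=
  match h : xs with
  | [] => (0, 0)
  | [x] => (x, x)
  | _ :: _ :: _ =>
    let mid := xs.length / 2
    let l := fmhGo (xs.take mid)
    let r := fmhGo (xs.drop mid)
    (l.1 + r.1, max l.2 r.2)
termination_by xs.length
decreasing_by
  · simp [h, List.length_take]; omega
  · simp [h]; omega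

def findMinHealth_alt (power : List Int) (armor : Int) : Int :=
  let sm := fmhGo power
  sm.1 - min sm.2 armor + 1

-- ===== PRECONDITION & SPEC =====
-- Pre_ excludes only power = [], on which both Pythons raise (A: ValueError from max of empty sequence; B: RecursionError).
def Pre_findMinHealth (power : List Int) (armor : Int) : Prop := power ≠ []
instance (power : List Int) (armor : Int) : Decidable (Pre_findMinHealth power armor) := by unfold Pre_findMinHealth; infer_instance
def pvWitness_findMinHealth : List Int × Int := ([3, 1, 4], 2)
def Spec_findMinHealth (power : List Int) (armor : Int) (out : Int) : Prop := out = findMinHealth_alt power armor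
instance (power : List Int) (armor : Int) (out : Int) : Decidable (Spec_findMinHealth power armor out) := by unfold Spec_findMinHealth; infer_instance

-- ===== CLAIM (what is proved, stated in full; the proofs are below) =====
def Claim_equal_findMinHealth : Prop := ∀ (power : List Int) (armor : Int), Dom_findMinHealth power armor → Pre_findMinHealth power armor → Spec_findMinHealth power armor (findMinHealth power armor)

-- ===== LEMMAS AND PROOFS =====

-- fmhGo on a nonempty list returns the sum and an element that bounds all elements
theorem fmhGo_spec (xs : List Int) (hne : xs ≠ []) :
    (fmhGo xs).1 = xs.sum ∧ (fmhGo xs).2 ∈ xs ∧ ∀ p ∈ xs, p ≤ (fmhGo xs).2 := by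
  induction xs using fmhGo.induct with
  | case1 => simp at hne
  | case2 x => simp [fmhGo]
  | case3 x y t mid ihl ihr =>
    set xs := x :: y :: t with hxs
    have hmid : mid = xs.length / 2 := rfl
    have hlen : xs.length = t.length + 2 := by simp [hxs]
    have hmid1 : 1 ≤ mid := by omega
    have hmidlt : mid < xs.length := by omega
    have htake : xs.take mid ≠ [] := by
      intro h
      have := congrArg List.length h
      simp [List.length_take] at this
      omega
    have hdrop : xs.drop mid ≠ [] := by
      intro h
      have := congrArg List.length h
      simp at this
      omega
    obtain ⟨hs1, hm1, hb1⟩ := ihl htake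
    obtain ⟨hs2, hm2, hb2⟩ := ihr hdrop
    have hsplit : xs.take mid ++ xs.drop mid = xs := List.take_append_drop mid xs
    have hunfold : fmhGo xs =
        ((fmhGo (xs.take mid)).1 + (fmhGo (xs.drop mid)).1,
         max (fmhGo (xs.take mid)).2 (fmhGo (xs.drop mid)).2) := by
      rw [hxs, fmhGo, ← hxs, ← hmid]
    rw [hunfold]
    refine ⟨?_, ?_, ?_⟩
    · show (fmhGo (xs.take mid)).1 + (fmhGo (xs.drop mid)).1 = xs.sum
      rw [hs1, hs2, ← List.sum_append, hsplit]
    · show max (fmhGo (xs.take mid)).2 (fmhGo (xs.drop mid)).2 ∈ xs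
      rcases max_choice (fmhGo (xs.take mid)).2 (fmhGo (xs.drop mid)).2 with h | h
      · rw [h]; exact List.mem_of_mem_take hm1
      · rw [h]; exact List.mem_of_mem_drop hm2
    · show ∀ p ∈ xs, p ≤ max (fmhGo (xs.take mid)).2 (fmhGo (xs.drop mid)).2
      intro p hp
      rw [← hsplit] at hp
      rcases List.mem_append.mp hp with h | h
      · exact le_trans (hb1 p h) (le_max_left _ _)
      · exact le_trans (hb2 p h) (le_max_right _ _)

-- once the flag is false, the loop just sums
theorem fmh_fold_false (armor : Int) (l : List Int) (r : Int) :
    l.foldl (fun (s : Int × Bool) p =>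
      if p > armor ∧ s.2 = true then (s.1 + (p - armor), false) else (s.1 + p, s.2)) (r, false)
    = (r + l.sum, false) := by
  induction l generalizing r with
  | nil => simp
  | cons p t ih => simp [ih]; ring

-- from a true flag: sum, minus armor iff some element exceeds armor; final flag = no element exceeds
theorem fmh_fold_true (armor : Int) (l : List Int) (r : Int) :
    l.foldl (fun (s : Int × Bool) p =>
      if p > armor ∧ s.2 = true then (s.1 + (p - armor), false) else (s.1 + p, s.2)) (r, true)
    = (r + l.sum + (if l.any (fun p => p > armor) then -armor else 0),
       !l.any (fun p => p > armor)) := by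
  induction l generalizing r with
  | nil => simp
  | cons p t ih =>
    by_cases h : p > armor
    · simp [h, fmh_fold_false]; ring
    · simp [h, ih]; ring_nf

-- ===== VERDICT (by name: the statement is the Claim_ definition above) =====
theorem findMinHealth_spec : Claim_equal_findMinHealth := by
  intro power armor _ hpre
  unfold Spec_findMinHealth findMinHealth findMinHealth_alt
  obtain ⟨hsum, hmem, hbound⟩ := fmhGo_spec power hpre
  rw [fmh_fold_true]
  by_cases h : power.any (fun p => p > armor)
  · -- some element exceeds armor, so (fmhGo power).2 > armor and min = armor
    obtain ⟨q, hq, hqa⟩ := List.any_eq_true.mp h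
    have : armor < (fmhGo power).2 := lt_of_lt_of_le (by exact_mod_cast of_decide_eq_true hqa) (hbound q hq)
    simp [h, hsum, min_eq_right (le_of_lt this)]
    ring
  · -- no element exceeds armor: fmhGo's max ≤ armor, and it equals PySem's max
    have hall : ∀ p ∈ power, p ≤ armor := by
      intro p hp
      by_contra hc
      exact h (List.any_eq_true.mpr ⟨p, hp, by simpa using lt_of_not_ge hc⟩)
    cases hmax : PySem.List.max? power (fun x => x) with
    | none => exact absurd ((PySem.List.max?_eq_none_iff power (fun x => x)).mp hmax) hpre
    | some m =>
      have hm1 : m ≤ (fmhGo power).2 := hbound m (PySem.List.max?_mem hmax)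
      have hm2 : (fmhGo power).2 ≤ m := PySem.List.max?_isMax hmax _ hmem
      have : m = (fmhGo power).2 := le_antisymm hm1 hm2
      simp [h, hsum, this, min_eq_left (hall _ hmem)]
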